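-- pv_equiv track=rewrite | github.com/multiversos/polisygnal | apps/api/app/services/market_freshness.py | _freshness_status
-- ===== SOURCE A (Python) =====
-- def _freshness_status(reasons: list[str]) -> str:
--     if not reasons:
--         return "fresh"
--     if any(reason in reasons for reason in {"market_closed", "close_time_past", "snapshot_too_old"}):
--         return "stale"
--     if any(
--         reason in reasons
--         for reason in {
--             "missing_snapshot",
--             "missing_prices",
--             "close_time_missing",
--             "data_quality_insufficient",
--         }
--     ):
--         return "incomplete"
--     return "unknown"
-- ===== SOURCE B (Python) =====
-- _STATUS = {
--     "market_closed": "stale",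
--     "close_time_past": "stale",
--     "snapshot_too_old": "stale",
--     "missing_snapshot": "incomplete",
--     "missing_prices": "incomplete",
--     "close_time_missing": "incomplete",
--     "data_quality_insufficient": "incomplete",
-- }
-- _PRIORITY = {"stale": 2, "incomplete": 1}
--
--
-- def _freshness_status(reasons: list[str]) -> str:
--     if not reasons:
--         return "fresh"
--     best = "unknown"
--     best_p = 0
--     for reason in reasons:
--         status = _STATUS.get(reason)
--         if status is not None and _PRIORITY[status] > best_p:
--             best = status
--             best_p = _PRIORITY[status]
--     return best
-- ===== Notes on version B (the rewrite author's own statement) =====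
-- stated objective: simpler
-- what changed: Replaces the chain of any-over-set membership tests with a module-level reason-to-status dict and a single precedence-tracking pass over the reasons list.
import Mathlib
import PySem

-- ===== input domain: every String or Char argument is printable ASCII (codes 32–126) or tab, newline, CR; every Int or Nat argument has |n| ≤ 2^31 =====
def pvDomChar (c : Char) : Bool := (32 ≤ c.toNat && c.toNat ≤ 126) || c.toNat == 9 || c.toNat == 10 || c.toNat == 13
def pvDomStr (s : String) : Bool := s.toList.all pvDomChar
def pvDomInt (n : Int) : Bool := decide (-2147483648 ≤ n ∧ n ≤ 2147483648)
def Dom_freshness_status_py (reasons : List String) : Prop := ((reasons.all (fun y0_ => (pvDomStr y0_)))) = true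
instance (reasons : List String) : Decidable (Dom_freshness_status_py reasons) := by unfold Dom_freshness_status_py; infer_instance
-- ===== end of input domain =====

-- B replaces A's chain of any-over-set membership tests with a reason→status dict and one precedence-tracking pass (objective: simpler).

-- ===== PORT A =====
-- Python iterates over the set literals and tests membership in `reasons`; `any` is order-independent, ported as List.any over the distinct literals.
def pvStaleReasons : List String := ["market_closed", "close_time_past", "snapshot_too_old"]
def pvIncompleteReasons : List String := ["missing_snapshot", "missing_prices", "close_time_missing", "data_quality_insufficient"]

def freshness_status_py (reasons : List String) : String :=
  if reasons = [] then "fresh"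
  else if pvStaleReasons.any (fun reason => reasons.contains reason) then "stale"
  else if pvIncompleteReasons.any (fun reason => reasons.contains reason) then "incomplete"
  else "unknown"

-- ===== PORT B =====
def pvStatusDict : PySem.Dict String String :=
  PySem.Dict.ofList [("market_closed", "stale"), ("close_time_past", "stale"), ("snapshot_too_old", "stale"),
   ("missing_snapshot", "incomplete"), ("missing_prices", "incomplete"),
   ("close_time_missing", "incomplete"), ("data_quality_insufficient", "incomplete")]

def pvPriorityDict : PySem.Dict String Int := PySem.Dict.ofList [("stale", 2), ("incomplete", 1)]

-- _PRIORITY[status]: status is always a value of _STATUS, hence a key of _PRIORITY, so getD 0 is exact here.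
def pvStepB (st : String × Int) (reason : String) : String × Int :=
  match PySem.Dict.get? pvStatusDict reason with
  | none => st
  | some status =>
      if PySem.Dict.getD pvPriorityDict status 0 > st.2
      then (status, PySem.Dict.getD pvPriorityDict status 0)
      else st

def freshness_status_py_alt (reasons : List String) : String :=
  if reasons = [] then "fresh"
  else (reasons.foldl pvStepB ("unknown", 0)).1

-- ===== PRECONDITION & SPEC =====
def Spec_freshness_status_py (reasons : List String) (out : String) : Prop := out = freshness_status_py_alt reasons
instance (reasons : List String) (out : String) : Decidable (Spec_freshness_status_py reasons out) := by unfold Spec_freshness_status_py; infer_instance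

-- ===== CLAIM (what is proved, stated in full; the proofs are below) =====
def Claim_equal_freshness_status_py : Prop := ∀ (reasons : List String), Dom_freshness_status_py reasons → Spec_freshness_status_py reasons (freshness_status_py reasons)

-- ===== LEMMAS AND PROOFS =====

lemma pvStep_char (st : String × Int) (r : String) :
    pvStepB st r =
      if pvStaleReasons.contains r then (if 2 > st.2 then ("stale", 2) else st)
      else if pvIncompleteReasons.contains r then (if 1 > st.2 then ("incomplete", 1) else st)
      else st := by
  by_cases h1 : r = "market_closed"
  · subst h1; rfl
  by_cases h2 : r = "close_time_past"
  · subst h2; rfl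
  by_cases h3 : r = "snapshot_too_old"
  · subst h3; rfl
  by_cases h4 : r = "missing_snapshot"
  · subst h4; rfl
  by_cases h5 : r = "missing_prices"
  · subst h5; rfl
  by_cases h6 : r = "close_time_missing"
  · subst h6; rfl
  by_cases h7 : r = "data_quality_insufficient"
  · subst h7; rfl
  -- r matches no known reason: every lookup and membership test misses
  have hitems : pvStatusDict.items =
      [("market_closed", "stale"), ("close_time_past", "stale"), ("snapshot_too_old", "stale"),
       ("missing_snapshot", "incomplete"), ("missing_prices", "incomplete"),
       ("close_time_missing", "incomplete"), ("data_quality_insufficient", "incomplete")] := rfl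
  simp [pvStepB, PySem.Dict.get?, hitems, pvStaleReasons, pvIncompleteReasons,
        h1, h2, h3, h4, h5, h6, h7,
        beq_eq_false_iff_ne.mpr (fun h => h1 h.symm),
        beq_eq_false_iff_ne.mpr (fun h => h2 h.symm),
        beq_eq_false_iff_ne.mpr (fun h => h3 h.symm),
        beq_eq_false_iff_ne.mpr (fun h => h4 h.symm),
        beq_eq_false_iff_ne.mpr (fun h => h5 h.symm),
        beq_eq_false_iff_ne.mpr (fun h => h6 h.symm),
        beq_eq_false_iff_ne.mpr (fun h => h7 h.symm)]

lemma pv_fold_stale (xs : List String) :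
    xs.foldl pvStepB ("stale", 2) = ("stale", 2) := by
  induction xs with
  | nil => rfl
  | cons x xs ih =>
      simp only [List.foldl_cons, pvStep_char]
      split_ifs <;> simp_all

lemma pv_fold_incomplete (xs : List String) :
    xs.foldl pvStepB ("incomplete", 1) =
      if xs.any (fun r => pvStaleReasons.contains r) then ("stale", 2) else ("incomplete", 1) := by
  induction xs with
  | nil => rfl
  | cons x xs ih =>
      simp only [List.foldl_cons, List.any_cons, pvStep_char]
      by_cases hs : pvStaleReasons.contains x <;>
        simp_all [pv_fold_stale]

lemma pv_fold_unknown (xs : List String) :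
    xs.foldl pvStepB ("unknown", 0) =
      if xs.any (fun r => pvStaleReasons.contains r) then ("stale", 2)
      else if xs.any (fun r => pvIncompleteReasons.contains r) then ("incomplete", 1)
      else ("unknown", 0) := by
  induction xs with
  | nil => rfl
  | cons x xs ih =>
      simp only [List.foldl_cons, List.any_cons, pvStep_char]
      by_cases hs : pvStaleReasons.contains x
      · simp_all [pv_fold_stale]
      · by_cases hi : pvIncompleteReasons.contains x <;>
          simp_all [pv_fold_incomplete]

lemma pv_any_comm (l xs : List String) :
    l.any (fun r => xs.contains r) = xs.any (fun r => l.contains r) := by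
  rw [Bool.eq_iff_iff]
  simp only [List.any_eq_true, List.contains_iff_mem]
  exact ⟨fun ⟨a, h1, h2⟩ => ⟨a, h2, h1⟩, fun ⟨a, h1, h2⟩ => ⟨a, h2, h1⟩⟩

-- ===== VERDICT (by name: the statement is the Claim_ definition above) =====
theorem freshness_status_py_spec : Claim_equal_freshness_status_py := by
  intro reasons _
  unfold Spec_freshness_status_py freshness_status_py freshness_status_py_alt
  by_cases h : reasons = []
  · simp [h]
  · rw [if_neg h, if_neg h, pv_fold_unknown,
      pv_any_comm pvStaleReasons reasons, pv_any_comm pvIncompleteReasons reasons]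
    split_ifs <;> rfl
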